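-- pv_equiv track=rewrite | github.com/srivikas777/Tracy | gpt_api.py | is_job_application_status
-- ===== SOURCE A (Python) =====
-- def is_job_application_status(prompt):
--     job_keywords = ["rejected","job application", "job status", "job offer", "job interview","applied","apply"]
--     internship_keywords = ["internship application", "internship status", "internship offer", "internship interview"]
--     prompt_lower = prompt.lower()
--     wrong_keywords = ["github","git","groww","digest", "article", "headline", "story", "report", "journalism", "news", "newspaper", "magazine", "press", "press release", "press conference"]
--     for keyword in job_keywords:
--         if keyword in wrong_keywords:
--             return False
--         if keyword in prompt_lower:
--             return True
--     for keyword in internship_keywords: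
--         if keyword in prompt_lower:
--             return True
--     return False
-- ===== SOURCE B (Python) =====
-- def is_job_application_status(prompt):
--     keywords = ["rejected", "job application", "job status", "job offer",
--                 "job interview", "applied", "apply",
--                 "internship application", "internship status",
--                 "internship offer", "internship interview"]
--     # Online multi-pattern matcher: one streaming pass over the characters,
--     # tracking the keyword suffixes still pending; a hit is a suffix emptying.
--     active = []
--     for ch in prompt.lower():
--         active = [k[1:] for k in keywords + active if k[:1] == ch]
--         if "" in active:
--             return True
--     return False
-- ===== Notes on version B (the rewrite author's own statement) =====
-- stated objective: alternative
-- what changed: B is an online multi-pattern matcher: one streaming pass over the lowercased prompt maintaining the set of partially matched keyword suffixes, instead of A's one full substring scan per keyword; A's dead wrong_keywords check is dropped.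
import Mathlib
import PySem

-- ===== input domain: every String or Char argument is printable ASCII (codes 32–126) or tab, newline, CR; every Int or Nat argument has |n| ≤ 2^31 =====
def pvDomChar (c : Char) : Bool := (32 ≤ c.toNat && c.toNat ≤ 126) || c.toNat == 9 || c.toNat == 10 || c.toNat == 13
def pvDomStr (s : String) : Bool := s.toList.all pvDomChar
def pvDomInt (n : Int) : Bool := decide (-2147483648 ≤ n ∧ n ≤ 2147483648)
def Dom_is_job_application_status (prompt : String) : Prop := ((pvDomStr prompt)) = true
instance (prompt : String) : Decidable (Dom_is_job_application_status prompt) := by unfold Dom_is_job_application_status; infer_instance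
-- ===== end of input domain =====

-- B is an online multi-pattern matcher: one streaming pass over the lowercased prompt
-- maintaining the partially matched keyword suffixes, instead of A's one full substring
-- scan per keyword (A's wrong_keywords check is dead and dropped).

-- ===== PORT A =====
def pvJobKeywords : List String :=
  ["rejected", "job application", "job status", "job offer", "job interview", "applied", "apply"]
def pvInternshipKeywords : List String :=
  ["internship application", "internship status", "internship offer", "internship interview"]
def pvWrongKeywords : List String :=
  ["github", "git", "groww", "digest", "article", "headline", "story", "report",
   "journalism", "news", "newspaper", "magazine", "press", "press release", "press conference"]

-- first loop: may return early with false (keyword in wrong_keywords) or true (found)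
def pvLoop1 (promptLower : String) : List String → Option Bool
  | [] => none
  | k :: rest =>
      if pvWrongKeywords.contains k then some false
      else if PySem.Str.isIn k promptLower then some true
      else pvLoop1 promptLower rest

-- second loop
def pvLoop2 (promptLower : String) : List String → Bool
  | [] => false
  | k :: rest => if PySem.Str.isIn k promptLower then true else pvLoop2 promptLower rest

def is_job_application_status (prompt : String) : Bool :=
  let prompt_lower := PySem.Str.lower prompt
  match pvLoop1 prompt_lower pvJobKeywords with
  | some b => b
  | none => pvLoop2 prompt_lower pvInternshipKeywords

-- ===== PORT B =====
def pvAllKeywords : List String :=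
  ["rejected", "job application", "job status", "job offer", "job interview", "applied", "apply",
   "internship application", "internship status", "internship offer", "internship interview"]

-- one step of the stream: 'active = [k[1:] for k in keywords + active if k[:1] == ch]'
def pvAltStep (kws active : List (List Char)) (c : Char) : List (List Char) :=
  (kws ++ active).filterMap fun k =>
    match k with
    | c' :: tl => if c' == c then some tl else none
    | [] => none

def pvAltLoop (kws active : List (List Char)) : List Char → Bool
  | [] => false
  | c :: rest =>
      let nxt := pvAltStep kws active c
      if nxt.contains ([] : List Char) then true else pvAltLoop kws nxt rest

def is_job_application_status_alt (prompt : String) : Bool :=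
  pvAltLoop (pvAllKeywords.map String.toList) [] (PySem.Str.lower prompt).toList

-- ===== PRECONDITION & SPEC =====
def Spec_is_job_application_status (prompt : String) (out : Bool) : Prop := out = is_job_application_status_alt prompt
instance (prompt : String) (out : Bool) : Decidable (Spec_is_job_application_status prompt out) := by unfold Spec_is_job_application_status; infer_instance

-- ===== CLAIM (what is proved, stated in full; the proofs are below) =====
def Claim_equal_is_job_application_status : Prop := ∀ (prompt : String), Dom_is_job_application_status prompt → Spec_is_job_application_status prompt (is_job_application_status prompt)

-- ===== LEMMAS AND PROOFS =====

-- A-side characterization (loops as 'some keyword is a substring')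
lemma pvLoop1_eq (p : String) (ks : List String)
    (h : ∀ k ∈ ks, pvWrongKeywords.contains k = false) :
    pvLoop1 p ks = if ks.any (fun k => PySem.Str.isIn k p) then some true else none := by
  induction ks with
  | nil => simp [pvLoop1]
  | cons k rest ih =>
      rw [pvLoop1, h k (by simp), List.any_cons]
      cases hin : PySem.Str.isIn k p with
      | true => simp only [Bool.true_or, Bool.false_eq_true, reduceIte]
      | false =>
          simp only [Bool.false_or, Bool.false_eq_true, reduceIte]
          exact ih fun x hx => h x (by simp [hx])

lemma pvLoop2_eq (p : String) (ks : List String) :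
    pvLoop2 p ks = ks.any (fun k => PySem.Str.isIn k p) := by
  induction ks with
  | nil => simp [pvLoop2]
  | cons k rest ih =>
      rw [pvLoop2, List.any_cons]
      cases hin : PySem.Str.isIn k p with
      | true => simp only [Bool.true_or, reduceIte]
      | false =>
          simp only [Bool.false_or, Bool.false_eq_true, reduceIte]
          exact ih

lemma pvA_eq_any (prompt : String) :
    is_job_application_status prompt
      = pvAllKeywords.any (fun k => PySem.Str.isIn k (PySem.Str.lower prompt)) := by
  show (match pvLoop1 (PySem.Str.lower prompt) pvJobKeywords with
        | some b => b
        | none => pvLoop2 (PySem.Str.lower prompt) pvInternshipKeywords) = _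
  rw [pvLoop1_eq _ _ (by decide), pvLoop2_eq,
      show pvAllKeywords = pvJobKeywords ++ pvInternshipKeywords from rfl, List.any_append]
  cases h : pvJobKeywords.any (fun k => PySem.Str.isIn k (PySem.Str.lower prompt)) with
  | true => simp only [reduceIte, Bool.true_or]
  | false => simp only [Bool.false_eq_true, reduceIte, Bool.false_or]

-- B-side: membership in one step of the stream
lemma pvMem_altStep (kws active : List (List Char)) (c : Char) (x : List Char) :
    x ∈ pvAltStep kws active c ↔ (c :: x ∈ kws ∨ c :: x ∈ active) := by
  have hfun : ∀ k : List Char,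
      (match k with
       | c' :: tl => if c' == c then some tl else none
       | [] => (none : Option (List Char))) = some x ↔ k = c :: x := by
    intro k
    cases k with
    | nil => simp
    | cons c' tl =>
        by_cases h : c' = c
        · subst h; simp
        · simp [h]
  constructor
  · intro hx
    obtain ⟨k, hk, hkx⟩ := List.mem_filterMap.1 hx
    rw [hfun k] at hkx
    subst hkx
    exact List.mem_append.1 hk
  · intro h
    exact List.mem_filterMap.2 ⟨c :: x, List.mem_append.2 h, (hfun _).2 rfl⟩

-- a nonempty suffix of t ++ [c] ends in c
lemma pvSuffix_snoc (s' t : List Char) (c : Char) (h : s' <:+ t ++ [c]) (hne : s' ≠ []) :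
    ∃ s, s' = s ++ [c] ∧ s <:+ t := by
  obtain ⟨u, hu⟩ := h
  have hlast : s'.getLast? = some c := by
    rw [← List.getLast?_append_of_ne_nil (l₁ := u) hne, hu, List.getLast?_concat]
  obtain ⟨s, hs⟩ : ∃ s, s' = s ++ [c] :=
    ⟨s'.dropLast, (List.dropLast_append_getLast? (l := s') c hlast).symm⟩
  refine ⟨s, hs, ⟨u, ?_⟩⟩
  have h2 : (u ++ s) ++ [c] = t ++ [c] := by rw [List.append_assoc, ← hs, hu]
  simpa using List.append_cancel_right h2

-- loop invariant / characterization: starting from a state whose active list holds exactly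
-- the residues of the nonempty suffixes of the processed part t, the loop returns true iff
-- some keyword is a suffix of t extended by some nonempty prefix of the remaining input.
lemma pvAltLoop_iff (kws : List (List Char)) (hkne : ∀ k ∈ kws, k ≠ [])
    (rest : List Char) :
    ∀ (t : List Char) (active : List (List Char)),
    (∀ x, x ∈ active ↔ ∃ k ∈ kws, ∃ s, s ≠ [] ∧ s ++ x = k ∧ s <:+ t) →
    (pvAltLoop kws active rest = true ↔
      ∃ r₁ r₂, rest = r₁ ++ r₂ ∧ r₁ ≠ [] ∧ ∃ k ∈ kws, k <:+ t ++ r₁) := by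
  induction rest with
  | nil =>
      intro t active _
      simp only [pvAltLoop, Bool.false_eq_true, false_iff]
      rintro ⟨r₁, r₂, hsplit, hne, -⟩
      exact hne (List.append_eq_nil_iff.1 hsplit.symm).1
  | cons c rs ih =>
      intro t active hact
      have hnxt : ∀ x, x ∈ pvAltStep kws active c ↔
          ∃ k ∈ kws, ∃ s', s' ≠ [] ∧ s' ++ x = k ∧ s' <:+ t ++ [c] := by
        intro x
        rw [pvMem_altStep, hact (c :: x)]
        constructor
        · rintro (hk | ⟨k, hk, s, hs, heq, hsuf⟩)
          · exact ⟨c :: x, hk, [c], by simp, by simp, List.suffix_append t [c]⟩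
          · refine ⟨k, hk, s ++ [c], by simp, by simp [← heq], ?_⟩
            obtain ⟨u, hu⟩ := hsuf
            exact ⟨u, by rw [← List.append_assoc, hu]⟩
        · rintro ⟨k, hk, s', hs', heq, hsuf⟩
          obtain ⟨s, rfl, hst⟩ := pvSuffix_snoc s' t c hsuf hs'
          cases s with
          | nil =>
              left
              have hck : c :: x = k := by simpa using heq
              rwa [hck]
          | cons d s0 =>
              right
              exact ⟨k, hk, d :: s0, by simp, by simpa [List.append_assoc] using heq, hst⟩
      rw [pvAltLoop]
      by_cases hempty : (pvAltStep kws active c).contains ([] : List Char)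
      · simp only [hempty, if_true, true_iff]
        have := (hnxt []).1 (by simpa using hempty)
        obtain ⟨k, hk, s', hs', heq, hsuf⟩ := this
        have hsk : s' = k := by simpa using heq
        exact ⟨[c], rs, rfl, by simp, k, hk, hsk ▸ hsuf⟩
      · simp only [hempty, Bool.false_eq_true, reduceIte]
        rw [ih (t ++ [c]) (pvAltStep kws active c) hnxt]
        constructor
        · rintro ⟨r₁, r₂, rfl, hr₁, k, hk, hsuf⟩
          exact ⟨c :: r₁, r₂, rfl, by simp, k, hk, by simpa [List.append_assoc] using hsuf⟩
        · rintro ⟨r₁, r₂, hsplit, hr₁, k, hk, hsuf⟩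
          cases r₁ with
          | nil => exact absurd rfl hr₁
          | cons c' r₁' =>
              obtain ⟨rfl, rfl⟩ : c' = c ∧ rs = r₁' ++ r₂ := by
                have := hsplit
                simp only [List.cons_append, List.cons.injEq] at this
                exact ⟨this.1.symm, this.2⟩
              cases r₁' with
              | nil =>
                  exfalso
                  apply hempty
                  simp only [List.contains_eq_mem, decide_eq_true_eq]
                  exact (hnxt []).2 ⟨k, hk, k, hkne k hk, by simp, by simpa using hsuf⟩
              | cons d r₁'' =>
                  exact ⟨d :: r₁'', r₂, rfl, by simp, k, hk,
                    by simpa [List.append_assoc] using hsuf⟩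

-- a nonempty infix is exactly a nonempty suffix of a nonempty prefix
lemma pvInfix_iff_suffix_of_prefix (k p : List Char) (hk : k ≠ []) :
    k <:+: p ↔ ∃ r₁ r₂, p = r₁ ++ r₂ ∧ r₁ ≠ [] ∧ k <:+ r₁ := by
  constructor
  · rintro ⟨a, b, rfl⟩
    exact ⟨a ++ k, b, by simp, by simp [hk], List.suffix_append a k⟩
  · rintro ⟨r₁, r₂, rfl, -, hsuf⟩
    exact hsuf.isInfix.trans (List.prefix_append r₁ r₂).isInfix

lemma pvKeywords_ne_nil : ∀ k ∈ pvAllKeywords.map String.toList, k ≠ [] := by decide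

theorem is_job_application_status_spec : Claim_equal_is_job_application_status := by
  intro prompt _
  unfold Spec_is_job_application_status
  rw [pvA_eq_any]
  unfold is_job_application_status_alt
  rw [Bool.eq_iff_iff,
      pvAltLoop_iff (pvAllKeywords.map String.toList) pvKeywords_ne_nil
        (PySem.Str.lower prompt).toList [] [] (by simp)]
  simp only [List.any_eq_true, PySem.Str.isIn_eq, PySem.Str.toList_lower, List.mem_map,
    List.nil_append]
  constructor
  · rintro ⟨k, hk, hin⟩
    have hinf := (PySem.Chars.isIn_iff_infix _ _).1 hin
    have hkne : k.toList ≠ [] := pvKeywords_ne_nil _ (List.mem_map.2 ⟨k, hk, rfl⟩)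
    obtain ⟨r₁, r₂, hsplit, hr₁, hsuf⟩ := (pvInfix_iff_suffix_of_prefix _ _ hkne).1 hinf
    exact ⟨r₁, r₂, hsplit, hr₁, k.toList, ⟨k, hk, rfl⟩, hsuf⟩
  · rintro ⟨r₁, r₂, hsplit, hr₁, kl, ⟨k, hk, rfl⟩, hsuf⟩
    refine ⟨k, hk, (PySem.Chars.isIn_iff_infix _ _).2 ?_⟩
    have hkne : k.toList ≠ [] := pvKeywords_ne_nil _ (List.mem_map.2 ⟨k, hk, rfl⟩)
    exact (pvInfix_iff_suffix_of_prefix _ _ hkne).2 ⟨r₁, r₂, hsplit, hr₁, hsuf⟩
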